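-- pv_equiv track=rewrite | github.com/jacobmentalconstruct/_TripartiteDataSTORE | src/chunkers/prose.py | _split_on_paragraphs
-- ===== SOURCE A (Python) =====
-- from typing import Optional
--
-- def _split_on_paragraphs(
--     lines: list[str],
-- ) -> list[tuple[int, int, list[str]]]:
--     """
--     Split plain text on blank-line paragraph boundaries.
--     Returns (start, end, []) — no heading path for plain text.
--     """
--     sections: list[tuple[int, int, list[str]]] = []
--     start: Optional[int] = None
--
--     for i, line in enumerate(lines):
--         stripped = line.strip()
--         if stripped:
--             if start is None:
--                 start = i
--         else:
--             if start is not None: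
--                 sections.append((start, i - 1, []))
--                 start = None
--
--     if start is not None:
--         sections.append((start, len(lines) - 1, []))
--
--     return sections
-- ===== SOURCE B (Python) =====
-- def _split_on_paragraphs(
--     lines: list[str],
-- ) -> list[tuple[int, int, list[str]]]:
--     # Boundary-pair method: collect the positions of all blank lines (with
--     # virtual blanks at -1 and len(lines)); each pair of consecutive blank
--     # positions more than one apart brackets exactly one paragraph.
--     blanks = [-1] + [i for i, line in enumerate(lines) if not line.strip()] + [len(lines)]
--     return [(p + 1, q - 1, []) for p, q in zip(blanks, blanks[1:]) if q - p > 1]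
-- ===== Notes on version B (the rewrite author's own statement) =====
-- stated objective: simpler
-- what changed: Replaced A's single stateful pass (Optional start sentinel plus post-loop flush) by a two-stage boundary-pair method: first collect all blank-line positions padded with virtual blanks at -1 and len(lines), then emit (p+1, q-1, []) for each pair of consecutive blank positions with q-p>1.
import Mathlib
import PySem

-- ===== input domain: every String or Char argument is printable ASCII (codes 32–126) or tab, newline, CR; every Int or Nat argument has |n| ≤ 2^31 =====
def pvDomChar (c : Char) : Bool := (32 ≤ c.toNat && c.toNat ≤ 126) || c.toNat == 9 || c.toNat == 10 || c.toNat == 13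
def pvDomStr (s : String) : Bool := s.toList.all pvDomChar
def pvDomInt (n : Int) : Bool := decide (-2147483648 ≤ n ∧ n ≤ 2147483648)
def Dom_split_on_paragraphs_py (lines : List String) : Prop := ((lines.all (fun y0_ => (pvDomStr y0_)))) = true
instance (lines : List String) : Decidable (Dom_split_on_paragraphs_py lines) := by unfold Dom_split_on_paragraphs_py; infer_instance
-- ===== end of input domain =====

-- B replaces A's stateful sentinel pass by a two-stage boundary-pair method
-- (collect blank positions, then pair consecutive ones); objective: simpler.
-- ===== PORT A =====
-- truthiness of line.strip()
def pvNonblank (s : String) : Bool := PySem.Str.strip s ≠ ""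

-- the enumerate loop of A: i is the current index, start the Optional[int] sentinel, acc the sections list
def pvGoA (i : Int) (start : Option Int) (acc : List (Int × Int × List String)) :
    List String → List (Int × Int × List String)
  | [] =>
    match start with
    | some s => acc ++ [(s, i - 1, [])]
    | none => acc
  | l :: rest =>
    if pvNonblank l then
      match start with
      | none => pvGoA (i + 1) (some i) acc rest
      | some s => pvGoA (i + 1) (some s) acc rest
    else
      match start with
      | some s => pvGoA (i + 1) none (acc ++ [(s, i - 1, [])]) rest
      | none => pvGoA (i + 1) none acc rest

def split_on_paragraphs_py (lines : List String) : List (Int × Int × List String) :=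
  pvGoA 0 none [] lines

-- ===== PORT B =====
-- the comprehension [i for i, line in enumerate(lines) if not line.strip()]
def pvBlankIdx (i : Int) : List String → List Int
  | [] => []
  | l :: rest => if pvNonblank l then pvBlankIdx (i + 1) rest else i :: pvBlankIdx (i + 1) rest

def split_on_paragraphs_py_alt (lines : List String) : List (Int × Int × List String) :=
  let blanks : List Int := -1 :: (pvBlankIdx 0 lines ++ [(lines.length : Int)])
  (blanks.zip blanks.tail).filterMap
    (fun pq => if pq.2 - pq.1 > 1 then some (pq.1 + 1, pq.2 - 1, ([] : List String)) else none)

-- ===== PRECONDITION & SPEC =====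
def Spec_split_on_paragraphs_py (lines : List String) (out : List (Int × Int × List String)) : Prop := out = split_on_paragraphs_py_alt lines
instance (lines : List String) (out : List (Int × Int × List String)) : Decidable (Spec_split_on_paragraphs_py lines out) := by unfold Spec_split_on_paragraphs_py; infer_instance

-- ===== CLAIM (what is proved, stated in full; the proofs are below) =====
def Claim_equal_split_on_paragraphs_py : Prop := ∀ (lines : List String), Dom_split_on_paragraphs_py lines → Spec_split_on_paragraphs_py lines (split_on_paragraphs_py lines)

-- ===== LEMMAS AND PROOFS =====

-- common reference form: the maximal nonblank runs of the suffix, first run starting at i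
def pvRuns (i : Int) : List String → List (Int × Int × List String)
  | [] => []
  | l :: rest =>
    if pvNonblank l then
      let run := rest.takeWhile pvNonblank
      (i, i + run.length, []) :: pvRuns (i + run.length + 1) (rest.dropWhile pvNonblank)
    else
      pvRuns (i + 1) rest
  termination_by ls => ls.length
  decreasing_by
  · simpa using Nat.lt_succ_of_le (List.length_dropWhile_le pvNonblank rest)
  · simp

-- B's pairwise scan, abstracted: prev is the previous blank position
def pvF (prev : Int) (bl : List Int) : List (Int × Int × List String) :=
  (((prev :: bl).zip bl).filterMap
    (fun pq => if pq.2 - pq.1 > 1 then some (pq.1 + 1, pq.2 - 1, ([] : List String)) else none))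

theorem pvF_nil (prev : Int) : pvF prev [] = [] := rfl

theorem pvF_cons (prev b : Int) (t : List Int) :
    pvF prev (b :: t) =
      (if b - prev > 1 then [(prev + 1, b - 1, ([] : List String))] else []) ++ pvF b t := by
  by_cases h : b - prev > 1 <;> simp [pvF, h]

-- A's loop computes the runs (both sentinel states at once)
theorem pvGoA_eq (lines : List String) :
    (∀ (i : Int) (acc : List (Int × Int × List String)),
        pvGoA i none acc lines = acc ++ pvRuns i lines) ∧
    (∀ (i s : Int) (acc : List (Int × Int × List String)),
        pvGoA i (some s) acc lines =
          acc ++ (s, i + (lines.takeWhile pvNonblank).length - 1, []) ::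
            pvRuns (i + (lines.takeWhile pvNonblank).length) (lines.dropWhile pvNonblank)) := by
  induction lines with
  | nil => exact ⟨fun i acc => by simp [pvGoA, pvRuns], fun i s acc => by simp [pvGoA, pvRuns]⟩
  | cons l rest ih =>
    constructor
    · intro i acc
      by_cases h : pvNonblank l = true
      · rw [pvRuns]
        simp only [pvGoA, h, if_pos, ih.2]
        ring_nf
      · rw [pvRuns]
        simp only [pvGoA, h, if_neg, Bool.false_eq_true, not_false_iff, ih.1]
    · intro i s acc
      by_cases h : pvNonblank l = true
      · simp only [pvGoA, h, if_pos, List.takeWhile_cons_of_pos h, List.dropWhile_cons_of_pos h,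
          ih.2, List.length_cons, Nat.cast_add, Nat.cast_one]
        ring_nf
      · simp only [pvGoA, h, if_neg, Bool.false_eq_true, not_false_iff,
          List.takeWhile_cons_of_neg h, List.dropWhile_cons_of_neg h, ih.1]
        rw [pvRuns]
        simp [h]

-- B's pairwise scan over the blank positions also computes the runs
theorem pvF_eq (lines : List String) :
    (∀ (i : Int),
        pvF (i - 1) (pvBlankIdx i lines ++ [i + (lines.length : Int)]) = pvRuns i lines) ∧
    (∀ (i s : Int), s ≤ i - 1 →
        pvF (s - 1) (pvBlankIdx i lines ++ [i + (lines.length : Int)]) =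
          (s, i + (lines.takeWhile pvNonblank).length - 1, []) ::
            pvRuns (i + (lines.takeWhile pvNonblank).length) (lines.dropWhile pvNonblank)) := by
  induction lines with
  | nil =>
    constructor
    · intro i
      simp [pvBlankIdx, pvF_cons, pvF_nil, pvRuns]
    · intro i s hs
      simp only [pvBlankIdx, List.nil_append, pvF_cons, pvF_nil, List.length_nil,
        Nat.cast_zero, add_zero, List.takeWhile_nil, List.dropWhile_nil]
      rw [if_pos (by omega : i - (s - 1) > 1)]
      simp [pvRuns]
  | cons l rest ih =>
    constructor
    · intro i
      by_cases h : pvNonblank l = true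
      · rw [pvRuns]
        simp only [pvBlankIdx, h, if_pos]
        calc pvF (i - 1) (pvBlankIdx (i + 1) rest ++ [i + ((l :: rest).length : Int)])
            = pvF (i - 1) (pvBlankIdx (i + 1) rest ++ [(i + 1) + (rest.length : Int)]) := by
              simp; ring_nf
          _ = _ := by rw [ih.2 (i + 1) i (by omega)]; simp; constructor <;> ring_nf
      · rw [pvRuns]
        simp only [pvBlankIdx, h, if_neg, Bool.false_eq_true, not_false_iff, List.cons_append]
        rw [pvF_cons]
        have hskip : ¬ (i - (i - 1) > 1) := by omega
        rw [if_neg hskip]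
        calc ([] : List (Int × Int × List String)) ++
              pvF i (pvBlankIdx (i + 1) rest ++ [i + ((l :: rest).length : Int)])
            = pvF ((i + 1) - 1) (pvBlankIdx (i + 1) rest ++ [(i + 1) + (rest.length : Int)]) := by
              simp; ring_nf
          _ = pvRuns (i + 1) rest := ih.1 (i + 1)
    · intro i s hs
      by_cases h : pvNonblank l = true
      · simp only [pvBlankIdx, h, if_pos, List.takeWhile_cons_of_pos h,
          List.dropWhile_cons_of_pos h]
        calc pvF (s - 1) (pvBlankIdx (i + 1) rest ++ [i + ((l :: rest).length : Int)])
            = pvF (s - 1) (pvBlankIdx (i + 1) rest ++ [(i + 1) + (rest.length : Int)]) := by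
              simp; ring_nf
          _ = _ := by rw [ih.2 (i + 1) s (by omega)]; simp; constructor <;> ring_nf
      · simp only [pvBlankIdx, h, if_neg, Bool.false_eq_true, not_false_iff,
          List.takeWhile_cons_of_neg h, List.dropWhile_cons_of_neg h, List.cons_append]
        rw [pvF_cons, if_pos (by omega : i - (s - 1) > 1)]
        have h1 : i + (((l :: rest).length : Int)) = (i + 1) + (rest.length : Int) := by
          simp; ring
        rw [h1]
        have h3 := ih.1 (i + 1)
        rw [show ((i : Int) + 1 - 1) = i by ring] at h3
        rw [h3]
        conv_rhs => rw [pvRuns]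
        simp [h]

-- ===== VERDICT (by name: the statement is the Claim_ definition above) =====
theorem split_on_paragraphs_py_spec : Claim_equal_split_on_paragraphs_py := by
  intro lines _
  have halt : split_on_paragraphs_py_alt lines =
      pvF (0 - 1) (pvBlankIdx 0 lines ++ [0 + (lines.length : Int)]) := by
    unfold split_on_paragraphs_py_alt pvF
    norm_num
  unfold Spec_split_on_paragraphs_py split_on_paragraphs_py
  rw [halt, (pvF_eq lines).1 0]
  simpa using (pvGoA_eq lines).1 0 []
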